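-- pv_equiv track=rewrite | github.com/advoet/dl-class | nn/layers/conv_layer.py | location_generator2
-- ===== SOURCE A (Python) =====
-- def location_generator2(height, width, kernel_size, padding, stride):
--         ''' Generator for kernel placements on padded data
--
--         :return: (x,y) row column location of top left corner of kernel
--         '''
--         x = 0
--         y = 0
--         while ((x + kernel_size - 1) < (height + 2*padding)):
--             while((y + kernel_size - 1) < (width + 2*padding)):
--                 yield [x,y]
--                 y += stride
--             y = 0
--             x += stride
-- ===== SOURCE B (Python) =====
-- def location_generator2(height, width, kernel_size, padding, stride):
--     ''' Generator for kernel placements on padded data (flat-index formulation) '''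
--     ny = max(0, (width + 2 * padding - kernel_size) // stride + 1)
--     nx = max(0, (height + 2 * padding - kernel_size) // stride + 1)
--     for i in range(nx * ny):
--         q, r = divmod(i, ny)
--         yield [q * stride, r * stride]
-- ===== Notes on version B (the rewrite author's own statement) =====
-- stated objective: alternative
-- what changed: Replaces the two nested while-loops with manual counters and inner reset by a closed-form count of placements (nx, ny) and a single flat loop over range(nx*ny) that recovers each coordinate pair by divmod arithmetic.
-- outside the precondition, e.g. on location_generator2(0, 0, 5, 0, 0): A returns [], B raises ZeroDivisionError
import Mathlib
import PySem

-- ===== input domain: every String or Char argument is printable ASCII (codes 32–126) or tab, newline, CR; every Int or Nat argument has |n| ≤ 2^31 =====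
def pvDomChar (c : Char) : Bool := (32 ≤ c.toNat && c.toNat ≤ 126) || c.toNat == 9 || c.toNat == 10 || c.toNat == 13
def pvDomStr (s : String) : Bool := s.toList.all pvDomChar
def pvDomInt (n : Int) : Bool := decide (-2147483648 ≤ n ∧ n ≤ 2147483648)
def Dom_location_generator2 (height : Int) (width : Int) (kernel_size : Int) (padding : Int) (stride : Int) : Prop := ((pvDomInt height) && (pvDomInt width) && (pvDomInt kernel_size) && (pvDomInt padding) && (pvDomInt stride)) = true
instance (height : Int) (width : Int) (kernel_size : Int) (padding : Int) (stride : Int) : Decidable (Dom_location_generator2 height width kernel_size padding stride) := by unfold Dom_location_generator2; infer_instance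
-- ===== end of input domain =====

-- B replaces A's two nested while-loops by closed-form placement counts and one flat
-- divmod loop (objective: alternative decomposition, same cost). Equal return values on
-- stride ≥ 1; on stride ≤ 0 A either diverges or returns [] while B divides by stride.

-- ===== PORT A =====
-- inner while loop of A; the Nat argument is fuel making the loop total (Pre_ gives stride ≥ 1, under which the fuel passed below suffices)
def pvInnerA (W k s x : Int) : Nat → Int → List (List Int)
  | 0, _ => []
  | fuel+1, y => if y + k - 1 < W then [x, y] :: pvInnerA W k s x fuel (y + s) else []

-- outer while loop of A (fuel-guarded likewise); inner loop restarts at y = 0 each round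
def pvOuterA (H W k s : Int) : Nat → Int → List (List Int)
  | 0, _ => []
  | fuel+1, x =>
    if x + k - 1 < H then
      pvInnerA W k s x (W - k + 1).toNat 0 ++ pvOuterA H W k s fuel (x + s)
    else []

def location_generator2 (height : Int) (width : Int) (kernel_size : Int) (padding : Int) (stride : Int) : List (List Int) :=
  pvOuterA (height + 2*padding) (width + 2*padding) kernel_size stride
    (height + 2*padding - kernel_size + 1).toNat 0

-- ===== PORT B =====
def location_generator2_alt (height : Int) (width : Int) (kernel_size : Int) (padding : Int) (stride : Int) : List (List Int) :=
  let ny := max 0 (PySem.Int.floordiv (width + 2*padding - kernel_size) stride + 1)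
  let nx := max 0 (PySem.Int.floordiv (height + 2*padding - kernel_size) stride + 1)
  (PySem.List.pyRange 0 (nx * ny)).map (fun i =>
    [PySem.Int.floordiv i ny * stride, PySem.Int.mod i ny * stride])

-- ===== PRECONDITION & SPEC =====
-- Pre_ excludes stride ≤ 0: there A diverges whenever at least one placement exists,
-- and where it does return (no placement fits) B's floor division by stride is a
-- ZeroDivisionError (stride = 0) or yields spurious placements (stride < 0).
def Pre_location_generator2 (height : Int) (width : Int) (kernel_size : Int) (padding : Int) (stride : Int) : Prop :=
  1 ≤ stride
instance (height : Int) (width : Int) (kernel_size : Int) (padding : Int) (stride : Int) : Decidable (Pre_location_generator2 height width kernel_size padding stride) := by unfold Pre_location_generator2; infer_instance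

def pvWitness_location_generator2 : Int × Int × Int × Int × Int := (4, 4, 2, 0, 2)

def Spec_location_generator2 (height : Int) (width : Int) (kernel_size : Int) (padding : Int) (stride : Int) (out : List (List Int)) : Prop := out = location_generator2_alt height width kernel_size padding stride
instance (height : Int) (width : Int) (kernel_size : Int) (padding : Int) (stride : Int) (out : List (List Int)) : Decidable (Spec_location_generator2 height width kernel_size padding stride out) := by unfold Spec_location_generator2; infer_instance

-- ===== CLAIM (what is proved, stated in full; the proofs are below) =====
def Claim_equal_location_generator2 : Prop := ∀ (height : Int) (width : Int) (kernel_size : Int) (padding : Int) (stride : Int), Dom_location_generator2 height width kernel_size padding stride → Pre_location_generator2 height width kernel_size padding stride → Spec_location_generator2 height width kernel_size padding stride (location_generator2 height width kernel_size padding stride)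

-- ===== LEMMAS AND PROOFS =====

-- number of loop iterations remaining from position y (dimension bound M, kernel k, stride s)
def pvCnt (M k s y : Int) : Nat := ((M - k - y) / s + 1).toNat

theorem pvCnt_zero_of_stop (M k s y : Int) (hs : 1 ≤ s) (h : ¬ y + k - 1 < M) :
    pvCnt M k s y = 0 := by
  have hneg : M - k - y < 0 := by omega
  have := Int.ediv_neg_of_neg_of_pos hneg (by omega : (0:Int) < s)
  unfold pvCnt; omega

theorem pvCnt_succ (M k s y : Int) (hs : 1 ≤ s) (h : y + k - 1 < M) :
    pvCnt M k s y = pvCnt M k s (y + s) + 1 := by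
  have hstep : (M - k - (y + s)) / s = (M - k - y) / s - 1 := by
    have h2 : M - k - (y + s) = M - k - y + (-1) * s := by ring
    rw [h2, Int.add_mul_ediv_right _ _ (by omega : s ≠ 0)]
    omega
  have hge : (0:Int) ≤ M - k - y := by omega
  have hq := Int.ediv_nonneg hge (by omega : (0:Int) ≤ s)
  unfold pvCnt; omega

theorem pvCnt_le (M k s : Int) (hs : 1 ≤ s) : pvCnt M k s 0 ≤ (M - k + 1).toNat := by
  by_cases h : (0:Int) ≤ M - k
  · have h1 := Int.ediv_le_self s h
    have h2 := Int.ediv_nonneg h (by omega : (0:Int) ≤ s)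
    simp only [pvCnt, sub_zero]; omega
  · have := Int.ediv_neg_of_neg_of_pos (by omega : M - k - 0 < 0) (by omega : (0:Int) < s)
    simp only [pvCnt] at this ⊢; omega

theorem pvInnerA_eq (W k s x : Int) (hs : 1 ≤ s) :
    ∀ (fuel : Nat) (y : Int), pvCnt W k s y ≤ fuel →
      pvInnerA W k s x fuel y
        = (List.range (pvCnt W k s y)).map (fun (j : Nat) => [x, y + (j:Int) * s]) := by
  intro fuel
  induction fuel with
  | zero =>
    intro y h
    have : pvCnt W k s y = 0 := by omega
    simp [pvInnerA, this]
  | succ fuel ih =>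
    intro y h
    by_cases hc : y + k - 1 < W
    · have hsucc := pvCnt_succ W k s y hs hc
      rw [hsucc, List.range_succ_eq_map]
      simp only [pvInnerA, if_pos hc, List.map_cons, List.map_map]
      congr 1
      · norm_num
      · rw [ih (y + s) (by omega)]
        apply List.map_congr_left
        intro j _
        simp only [Function.comp]
        push_cast
        ring_nf
    · have h0 := pvCnt_zero_of_stop W k s y hs hc
      simp [pvInnerA, hc, h0]

theorem pvOuterA_eq (H W k s : Int) (hs : 1 ≤ s) :
    ∀ (fuel : Nat) (x : Int), pvCnt H k s x ≤ fuel →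
      pvOuterA H W k s fuel x
        = (List.range (pvCnt H k s x)).flatMap (fun (i : Nat) =>
            (List.range (pvCnt W k s 0)).map (fun (j : Nat) => [x + (i:Int) * s, (j:Int) * s])) := by
  intro fuel
  induction fuel with
  | zero =>
    intro x h
    have : pvCnt H k s x = 0 := by omega
    simp [pvOuterA, this]
  | succ fuel ih =>
    intro x h
    by_cases hc : x + k - 1 < H
    · have hsucc := pvCnt_succ H k s x hs hc
      rw [hsucc, List.range_succ_eq_map]
      simp only [pvOuterA, if_pos hc, List.flatMap_cons, List.flatMap_map]
      congr 1
      · rw [pvInnerA_eq W k s x hs _ 0 (pvCnt_le W k s hs)]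
        apply List.map_congr_left
        intro j _
        norm_num
      · rw [ih (x + s) (by omega)]
        apply List.flatMap_congr
        intro i _
        apply List.map_congr_left
        intro j _
        push_cast
        ring_nf
    · have h0 := pvCnt_zero_of_stop H k s x hs hc
      simp [pvOuterA, hc, h0]

-- flat divmod enumeration of a grid equals the nested enumeration
theorem pvRangeMulDivmod {β : Type} (a b : Nat) (g : Nat → Nat → β) :
    (List.range (a * b)).map (fun m => g (m / b) (m % b))
      = (List.range a).flatMap (fun i => (List.range b).map (fun j => g i j)) := by
  induction a with
  | zero => simp
  | succ a ih =>
    rcases Nat.eq_zero_or_pos b with hb | hb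
    · subst hb; simp
    · rw [Nat.succ_mul, List.range_add, List.map_append, ih, List.range_succ,
        List.flatMap_append, List.map_map]
      congr 1
      simp only [List.flatMap_cons, List.flatMap_nil, List.append_nil]
      apply List.map_congr_left
      intro m hm
      have hmb : m < b := List.mem_range.mp hm
      simp only [Function.comp]
      have hd : (a * b + m) / b = a := by
        rw [Nat.add_comm, Nat.add_mul_div_right _ _ hb, Nat.div_eq_of_lt hmb]
        omega
      have hmod : (a * b + m) % b = m := by
        rw [Nat.add_comm, Nat.add_mul_mod_self_right, Nat.mod_eq_of_lt hmb]
      rw [hd, hmod]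

-- ===== VERDICT (by name: the statement is the Claim_ definition above) =====
theorem location_generator2_spec : Claim_equal_location_generator2 := by
  intro height width kernel_size padding stride _ hs
  unfold Pre_location_generator2 at hs
  unfold Spec_location_generator2
  have hspos : (0:Int) < stride := by omega
  simp only [location_generator2, location_generator2_alt]
  rw [pvOuterA_eq _ _ _ _ hs _ 0
    (pvCnt_le (height + 2*padding) kernel_size stride hs)]
  have hnyI : max 0 (PySem.Int.floordiv (width + 2*padding - kernel_size) stride + 1)
      = ((pvCnt (width + 2*padding) kernel_size stride 0 : Nat) : Int) := by
    rw [PySem.Int.floordiv_eq_ediv_of_pos hspos]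
    simp only [pvCnt, sub_zero]; omega
  have hnxI : max 0 (PySem.Int.floordiv (height + 2*padding - kernel_size) stride + 1)
      = ((pvCnt (height + 2*padding) kernel_size stride 0 : Nat) : Int) := by
    rw [PySem.Int.floordiv_eq_ediv_of_pos hspos]
    simp only [pvCnt, sub_zero]; omega
  rw [hnyI, hnxI, ← Nat.cast_mul, PySem.List.pyRange_zero, Int.toNat_natCast, List.map_map]
  have hmap : (List.range (pvCnt (height + 2*padding) kernel_size stride 0
        * pvCnt (width + 2*padding) kernel_size stride 0)).map
        ((fun i => [PySem.Int.floordiv i ((pvCnt (width + 2*padding) kernel_size stride 0 : Nat) : Int) * stride,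
                    PySem.Int.mod i ((pvCnt (width + 2*padding) kernel_size stride 0 : Nat) : Int) * stride])
          ∘ (fun (m : Nat) => (m : Int)))
      = (List.range (pvCnt (height + 2*padding) kernel_size stride 0
        * pvCnt (width + 2*padding) kernel_size stride 0)).map
        (fun (m : Nat) => (fun (i j : Nat) => [((i : Nat) : Int) * stride, ((j : Nat) : Int) * stride])
          (m / pvCnt (width + 2*padding) kernel_size stride 0)
          (m % pvCnt (width + 2*padding) kernel_size stride 0)) := by
    apply List.map_congr_left
    intro m _
    simp [Function.comp, PySem.Int.floordiv_natCast, PySem.Int.mod_natCast]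
  rw [hmap, pvRangeMulDivmod (pvCnt (height + 2*padding) kernel_size stride 0)
    (pvCnt (width + 2*padding) kernel_size stride 0)
    (fun (i j : Nat) => [((i : Nat) : Int) * stride, ((j : Nat) : Int) * stride])]
  apply List.flatMap_congr
  intro i _
  apply List.map_congr_left
  intro j _
  norm_num
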